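-- pv_equiv track=rewrite | github.com/Ksenon07147/pos-tag-extract-analysis | Social_Media/language.py | keyword_position
-- ===== SOURCE A (Python) =====
-- keywords =  ['quality', ' service', '购买', '卖家', 'kemas']
--
-- def keyword_position(text, n_gram):
--
--     keyword = []
--     index_of_keyword =[]
--
--     tempList = list(text.split(" "))
--
--     for x in keywords:
--         i = 0
--         for y in tempList:
--             if x == y:
--                 keyword.append(x)
--                 index_of_keyword.append(i)
--             i = i + 1
--
--     if keyword == []:
--         return
--
--     if n_gram == 3 or n_gram == 2:
--         return text
--
--     if n_gram == 5:
--         if 2 in index_of_keyword: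
--             return text
--
--     if n_gram == 4:
--         if 1 in index_of_keyword or 2 in index_of_keyword:
--             return text
--
--     return
-- ===== SOURCE B (Python) =====
-- keywords = ['quality', ' service', '购买', '卖家', 'kemas']
--
-- def keyword_position(text, n_gram):
--     kwset = set(keywords)
--     positions = set()
--     for i, word in enumerate(text.split(' ')):
--         if word in kwset:
--             positions.add(i)
--     if not positions:
--         return None
--     if n_gram == 2 or n_gram == 3:
--         return text
--     if n_gram == 5 and 2 in positions:
--         return text
--     if n_gram == 4 and (1 in positions or 2 in positions):
--         return text
--     return None
-- ===== Notes on version B (the rewrite author's own statement) =====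
-- stated objective: simpler
-- what changed: Replaces A's nested keyword-by-keyword scan (rebuilding an index counter per keyword and accumulating parallel lists) with a single pass over the enumerated tokens that records matching positions in a set, then evaluates the same n_gram branches against that set.
import Mathlib
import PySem

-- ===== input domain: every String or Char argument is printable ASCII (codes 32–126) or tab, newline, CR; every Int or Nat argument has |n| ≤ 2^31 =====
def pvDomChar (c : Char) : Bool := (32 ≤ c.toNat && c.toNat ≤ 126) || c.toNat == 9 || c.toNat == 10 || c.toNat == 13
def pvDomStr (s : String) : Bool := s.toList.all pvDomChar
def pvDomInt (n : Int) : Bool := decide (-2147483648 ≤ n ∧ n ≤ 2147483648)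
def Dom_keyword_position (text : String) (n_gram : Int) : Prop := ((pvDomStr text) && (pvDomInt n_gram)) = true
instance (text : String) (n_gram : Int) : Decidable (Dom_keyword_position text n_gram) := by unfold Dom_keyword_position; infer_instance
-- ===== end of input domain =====

-- B replaces A's nested keyword-by-keyword scan with a single pass over the enumerated
-- tokens collecting matching positions into a set (objective: simpler).

-- module-level constant 'keywords'
def pvKeywords : List String := ["quality", " service", "购买", "卖家", "kemas"]

-- ===== PORT A =====
def keyword_position (text : String) (n_gram : Int) : Option String :=
  let tempList := (PySem.Str.split? text " ").getD []   -- sep ≠ "" so split? is always some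
  let acc := pvKeywords.foldl
    (fun (acc : List String × List Int) x =>
      let st := tempList.foldl
        (fun (st : List String × List Int × Int) y =>
          if x == y then (st.1 ++ [x], st.2.1 ++ [st.2.2], st.2.2 + 1)
          else (st.1, st.2.1, st.2.2 + 1))
        (acc.1, acc.2, (0 : Int))
      (st.1, st.2.1))
    ([], [])
  if acc.1 == [] then none
  else if n_gram == 3 || n_gram == 2 then some text
  else if n_gram == 5 then (if acc.2.contains 2 then some text else none)
  else if n_gram == 4 then (if acc.2.contains 1 || acc.2.contains 2 then some text else none)
  else none

-- ===== PORT B =====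
def keyword_position_alt (text : String) (n_gram : Int) : Option String :=
  let kwset : PySem.Set String := PySem.Set.ofList pvKeywords
  let positions : PySem.Set Int :=
    (PySem.List.enumerate ((PySem.Str.split? text " ").getD []) 0).foldl
      (fun ps p => if PySem.Set.contains kwset p.2 then PySem.Set.add ps p.1 else ps)
      PySem.Set.empty
  if positions.isEmpty then none
  else if n_gram == 2 || n_gram == 3 then some text
  else if n_gram == 5 && PySem.Set.contains positions 2 then some text
  else if n_gram == 4 && (PySem.Set.contains positions 1 || PySem.Set.contains positions 2) then some text
  else none

-- ===== PRECONDITION & SPEC =====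
def Spec_keyword_position (text : String) (n_gram : Int) (out : Option String) : Prop := out = keyword_position_alt text n_gram
instance (text : String) (n_gram : Int) (out : Option String) : Decidable (Spec_keyword_position text n_gram out) := by unfold Spec_keyword_position; infer_instance

-- ===== CLAIM (what is proved, stated in full; the proofs are below) =====
def Claim_equal_keyword_position : Prop := ∀ (text : String) (n_gram : Int), Dom_keyword_position text n_gram → Spec_keyword_position text n_gram (keyword_position text n_gram)

-- ===== LEMMAS AND PROOFS =====

-- positions (as Ints, starting at i0) of the tokens equal to x — spec of A's inner loop
def pvPos (x : String) : List String → Int → List Int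
  | [], _ => []
  | y :: t, i => if x == y then i :: pvPos x t (i + 1) else pvPos x t (i + 1)

theorem pvInner (x : String) (ys : List String) (kw : List String) (idx : List Int) (i0 : Int) :
    ys.foldl
      (fun (st : List String × List Int × Int) y =>
        if x == y then (st.1 ++ [x], st.2.1 ++ [st.2.2], st.2.2 + 1)
        else (st.1, st.2.1, st.2.2 + 1)) (kw, idx, i0)
    = (kw ++ (ys.filter (fun y => x == y)).map (fun _ => x),
       idx ++ pvPos x ys i0, i0 + ys.length) := by
  induction ys generalizing kw idx i0 with
  | nil => simp [pvPos]
  | cons y t ih =>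
    by_cases h : (x == y) = true
    · rw [List.foldl_cons, if_pos h, ih]
      simp only [pvPos, List.filter_cons, h, List.map_cons, List.length_cons,
        Prod.mk.injEq, List.append_assoc, List.singleton_append, if_true]
      refine ⟨trivial, trivial, ?_⟩
      push_cast
      ring
    · rw [List.foldl_cons, if_neg h, ih]
      simp only [pvPos, List.filter_cons, h, List.length_cons, Prod.mk.injEq,
        Bool.false_eq_true, if_false]
      refine ⟨trivial, trivial, ?_⟩
      push_cast
      ring

theorem pvOuterAux (ts : List String) (ks : List String) (kw : List String) (idx : List Int) :
    ks.foldl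
      (fun (acc : List String × List Int) x =>
        (acc.1 ++ (ts.filter (fun y => x == y)).map (fun _ => x), acc.2 ++ pvPos x ts 0))
      (kw, idx)
    = (kw ++ ks.flatMap (fun x => (ts.filter (fun y => x == y)).map (fun _ => x)),
       idx ++ ks.flatMap (fun x => pvPos x ts 0)) := by
  induction ks generalizing kw idx with
  | nil => simp
  | cons a l ih =>
    simp only [List.foldl_cons]
    rw [ih]
    simp only [List.flatMap_cons, List.append_assoc]

theorem pvOuter (ts : List String) (ks : List String) (kw : List String) (idx : List Int) :
    ks.foldl
      (fun (acc : List String × List Int) x =>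
        let st := ts.foldl
          (fun (st : List String × List Int × Int) y =>
            if x == y then (st.1 ++ [x], st.2.1 ++ [st.2.2], st.2.2 + 1)
            else (st.1, st.2.1, st.2.2 + 1)) (acc.1, acc.2, (0 : Int))
        (st.1, st.2.1)) (kw, idx)
    = (kw ++ ks.flatMap (fun x => (ts.filter (fun y => x == y)).map (fun _ => x)),
       idx ++ ks.flatMap (fun x => pvPos x ts 0)) := by
  simp only [pvInner]
  exact pvOuterAux ts ks kw idx

theorem pvMem_pvPos (x : String) (ys : List String) (i0 j : Int) :
    j ∈ pvPos x ys i0 ↔ ∃ k : Nat, ∃ _ : k < ys.length, ys[k] = x ∧ j = i0 + k := by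
  induction ys generalizing i0 with
  | nil => simp [pvPos]
  | cons y t ih =>
    have hsplit : (∃ k : Nat, ∃ _ : k < (y :: t).length, (y :: t)[k] = x ∧ j = i0 + k)
        ↔ ((y = x ∧ j = i0) ∨ ∃ k : Nat, ∃ _ : k < t.length, t[k] = x ∧ j = (i0 + 1) + k) := by
      constructor
      · rintro ⟨k, hk, hx, rfl⟩
        match k with
        | 0 => exact Or.inl ⟨by simpa using hx, by simp⟩
        | k + 1 =>
          exact Or.inr ⟨k, Nat.lt_of_succ_lt_succ (by simpa using hk), by simpa using hx,
            by push_cast; ring⟩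
      · rintro (⟨hx, rfl⟩ | ⟨k, hk, hx, rfl⟩)
        · exact ⟨0, by simp, by simpa using hx, by simp⟩
        · exact ⟨k + 1, by simpa using Nat.succ_lt_succ hk, by simpa using hx, by push_cast; ring⟩
    rw [hsplit]
    simp only [pvPos]
    by_cases h : (x == y) = true
    · have hyx : y = x := (eq_of_beq h).symm
      rw [if_pos h]
      simp only [List.mem_cons, ih]
      constructor
      · rintro (rfl | ⟨k, hk, hx2, rfl⟩)
        · exact Or.inl ⟨hyx, rfl⟩
        · exact Or.inr ⟨k, hk, hx2, rfl⟩
      · rintro (⟨_, rfl⟩ | ⟨k, hk, hx2, rfl⟩)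
        · exact Or.inl rfl
        · exact Or.inr ⟨k, hk, hx2, rfl⟩
    · have hyx : ¬ (y = x) := fun e => h (by simp [e])
      rw [if_neg h, ih]
      constructor
      · rintro ⟨k, hk, hx2, rfl⟩
        exact Or.inr ⟨k, hk, hx2, rfl⟩
      · rintro (⟨e, rfl⟩ | ⟨k, hk, hx2, rfl⟩)
        · exact absurd e hyx
        · exact ⟨k, hk, hx2, rfl⟩

theorem pvMemIdx (ts ks : List String) (j : Int) :
    j ∈ ks.flatMap (fun x => pvPos x ts 0) ↔
      ∃ k : Nat, ∃ _ : k < ts.length, ts[k] ∈ ks ∧ j = (k : Int) := by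
  simp only [List.mem_flatMap, pvMem_pvPos]
  constructor
  · rintro ⟨x, hx, k, hk, hts, rfl⟩
    exact ⟨k, hk, hts ▸ hx, by simp⟩
  · rintro ⟨k, hk, hmem, rfl⟩
    exact ⟨ts[k], hmem, k, hk, rfl, by simp⟩

theorem pvKwEmpty (ts ks : List String) :
    ks.flatMap (fun x => (ts.filter (fun y => x == y)).map (fun _ => x)) = [] ↔
      ¬ ∃ k : Nat, ∃ _ : k < ts.length, ts[k] ∈ ks := by
  simp only [List.flatMap_eq_nil_iff, List.map_eq_nil_iff, List.filter_eq_nil_iff]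
  constructor
  · rintro h ⟨k, hk, hmem⟩
    exact h ts[k] hmem ts[k] (List.getElem_mem hk) (by simp)
  · intro h x hx y hy hxy
    exact h ⟨ts.idxOf y, List.idxOf_lt_length_of_mem hy,
      by rw [List.getElem_idxOf (List.idxOf_lt_length_of_mem hy)]; exact (beq_iff_eq.mp hxy) ▸ hx⟩

theorem pvMem_foldB (kwset : PySem.Set String) (l : List (Int × String)) (ps : PySem.Set Int)
    (j : Int) :
    j ∈ l.foldl
        (fun ps p => if PySem.Set.contains kwset p.2 then PySem.Set.add ps p.1 else ps) ps ↔
      j ∈ ps ∨ ∃ p ∈ l, PySem.Set.contains kwset p.2 = true ∧ j = p.1 := by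
  induction l generalizing ps with
  | nil => simp
  | cons p t ih =>
    by_cases h : PySem.Set.contains kwset p.2 = true
    · simp only [List.foldl_cons, h, if_true, ih, PySem.Set.mem_add, List.mem_cons]
      constructor
      · rintro ((hj | rfl) | ⟨q, hq, hc, rfl⟩)
        · exact Or.inl hj
        · exact Or.inr ⟨p, Or.inl rfl, h, rfl⟩
        · exact Or.inr ⟨q, Or.inr hq, hc, rfl⟩
      · rintro (hj | ⟨q, (rfl | hq), hc, rfl⟩)
        · exact Or.inl (Or.inl hj)
        · exact Or.inl (Or.inr rfl)
        · exact Or.inr ⟨q, hq, hc, rfl⟩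
    · simp only [List.foldl_cons, h, ih, List.mem_cons]
      constructor
      · rintro (hj | ⟨q, hq, hc, rfl⟩)
        · exact Or.inl hj
        · exact Or.inr ⟨q, Or.inr hq, hc, rfl⟩
      · rintro (hj | ⟨q, (rfl | hq), hc, rfl⟩)
        · exact Or.inl hj
        · exact absurd hc h
        · exact Or.inr ⟨q, hq, hc, rfl⟩

theorem pvMemPositions (ts : List String) (j : Int) :
    j ∈ (PySem.List.enumerate ts 0).foldl
        (fun ps p =>
          if PySem.Set.contains (PySem.Set.ofList pvKeywords) p.2 then PySem.Set.add ps p.1 else ps)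
        PySem.Set.empty ↔
      ∃ k : Nat, ∃ _ : k < ts.length, ts[k] ∈ pvKeywords ∧ j = (k : Int) := by
  rw [pvMem_foldB]
  simp only [PySem.Set.empty, List.not_mem_nil, false_or]
  constructor
  · rintro ⟨p, hp, hc, rfl⟩
    rcases (PySem.List.mem_enumerate_iff ts 0 p).mp hp with ⟨k, hk, rfl⟩
    refine ⟨k, hk, ?_, by simp⟩
    simpa [PySem.Set.mem_ofList] using (PySem.Set.contains_iff _ _).mp hc
  · rintro ⟨k, hk, hmem, rfl⟩
    refine ⟨((k : Int), ts[k]), (PySem.List.mem_enumerate_iff ts 0 _).mpr ⟨k, hk, by simp⟩,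
      (PySem.Set.contains_iff _ _).mpr ((PySem.Set.mem_ofList _ _).mpr hmem), rfl⟩

theorem pvMain (ts : List String) (txt : String) (n_gram : Int) :
    (let acc := pvKeywords.foldl
      (fun (acc : List String × List Int) x =>
        let st := ts.foldl
          (fun (st : List String × List Int × Int) y =>
            if x == y then (st.1 ++ [x], st.2.1 ++ [st.2.2], st.2.2 + 1)
            else (st.1, st.2.1, st.2.2 + 1))
          (acc.1, acc.2, (0 : Int))
        (st.1, st.2.1))
      ([], [])
     if acc.1 == [] then none
     else if n_gram == 3 || n_gram == 2 then some txt
     else if n_gram == 5 then (if acc.2.contains 2 then some txt else none)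
     else if n_gram == 4 then (if acc.2.contains 1 || acc.2.contains 2 then some txt else none)
     else none : Option String)
    = (let positions : PySem.Set Int :=
        (PySem.List.enumerate ts 0).foldl
          (fun ps p =>
            if PySem.Set.contains (PySem.Set.ofList pvKeywords) p.2 then PySem.Set.add ps p.1
            else ps)
          PySem.Set.empty
       if positions.isEmpty then none
       else if n_gram == 2 || n_gram == 3 then some txt
       else if n_gram == 5 && PySem.Set.contains positions 2 then some txt
       else if n_gram == 4 &&
           (PySem.Set.contains positions 1 || PySem.Set.contains positions 2) then some txt
       else none) := by
  rw [pvOuter]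
  simp only [List.nil_append]
  set positions := (PySem.List.enumerate ts 0).foldl
      (fun ps p =>
        if PySem.Set.contains (PySem.Set.ofList pvKeywords) p.2 then PySem.Set.add ps p.1 else ps)
      PySem.Set.empty with hpos
  by_cases hE : ∃ k : Nat, ∃ _ : k < ts.length, ts[k] ∈ pvKeywords
  · have hkw : (pvKeywords.flatMap
        (fun x => (ts.filter (fun y => x == y)).map (fun _ => x)) == []) = false := by
      rw [beq_eq_false_iff_ne]
      intro h
      exact (pvKwEmpty ts pvKeywords).mp h hE
    have hne : ¬ positions.isEmpty := by
      rcases hE with ⟨k, hk, hmem⟩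
      rw [List.isEmpty_iff]
      intro h
      have : (k : Int) ∈ positions := (pvMemPositions ts (k : Int)).mpr ⟨k, hk, hmem, rfl⟩
      rw [h] at this
      exact List.not_mem_nil this
    have hc1 : (pvKeywords.flatMap (fun x => pvPos x ts 0)).contains (1 : Int)
        = PySem.Set.contains positions 1 := by
      rw [Bool.eq_iff_iff, List.contains_iff_mem, PySem.Set.contains_iff,
        pvMemIdx, pvMemPositions]
    have hc2 : (pvKeywords.flatMap (fun x => pvPos x ts 0)).contains (2 : Int)
        = PySem.Set.contains positions 2 := by
      rw [Bool.eq_iff_iff, List.contains_iff_mem, PySem.Set.contains_iff,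
        pvMemIdx, pvMemPositions]
    simp only [hkw, Bool.not_eq_true] at *
    simp only [hne, hc1, hc2, if_false, Bool.false_eq_true]
    by_cases h3 : n_gram = 3 <;> by_cases h2 : n_gram = 2 <;>
      by_cases h5 : n_gram = 5 <;> by_cases h4 : n_gram = 4 <;>
      simp_all
  · have hkw : (pvKeywords.flatMap
        (fun x => (ts.filter (fun y => x == y)).map (fun _ => x)) == []) = true := by
      rw [beq_iff_eq]
      exact (pvKwEmpty ts pvKeywords).mpr hE
    have hemp : positions.isEmpty := by
      rw [List.isEmpty_iff, List.eq_nil_iff_forall_not_mem]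
      intro j hj
      rcases (pvMemPositions ts j).mp hj with ⟨k, hk, hmem, rfl⟩
      exact hE ⟨k, hk, hmem⟩
    rw [if_pos hkw, if_pos hemp]

-- ===== VERDICT (by name: the statement is the Claim_ definition above) =====
theorem keyword_position_spec : Claim_equal_keyword_position := by
  intro text n_gram _
  show keyword_position text n_gram = keyword_position_alt text n_gram
  exact pvMain ((PySem.Str.split? text " ").getD []) text n_gram
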